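-- pv_equiv track=rewrite | github.com/bachkimn/Privacy-Net-An-Adversarial-Approach-forIdentity-Obfuscated-Segmentation-of-MedicalImages | ultils.py | get_subject_list
-- ===== SOURCE A (Python) =====
-- def get_subject_list(image_list):
-- 	subject_list = {}
-- 	for image in image_list:
-- 		subject = image.split('_')[0]
-- 		if subject in subject_list.keys():
-- 			subject_list[subject].append(image)
-- 		else:
-- 			subject_list[subject] = [image]
-- 	return subject_list
-- ===== SOURCE B (Python) =====
-- def get_subject_list(image_list):
-- 	key = lambda name: name.split('_')[0]
-- 	subjects = list(dict.fromkeys(map(key, image_list)))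
-- 	return {s: [img for img in image_list if key(img) == s] for s in subjects}
-- ===== Notes on version B (the rewrite author's own statement) =====
-- stated objective: alternative
-- what changed: Replaces the one-pass dict-accumulate (lookup key, append or create) with a two-phase plan: dedup the subject keys in first-occurrence order, then build each group by filtering the whole list per subject in a dict comprehension.
import Mathlib
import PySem

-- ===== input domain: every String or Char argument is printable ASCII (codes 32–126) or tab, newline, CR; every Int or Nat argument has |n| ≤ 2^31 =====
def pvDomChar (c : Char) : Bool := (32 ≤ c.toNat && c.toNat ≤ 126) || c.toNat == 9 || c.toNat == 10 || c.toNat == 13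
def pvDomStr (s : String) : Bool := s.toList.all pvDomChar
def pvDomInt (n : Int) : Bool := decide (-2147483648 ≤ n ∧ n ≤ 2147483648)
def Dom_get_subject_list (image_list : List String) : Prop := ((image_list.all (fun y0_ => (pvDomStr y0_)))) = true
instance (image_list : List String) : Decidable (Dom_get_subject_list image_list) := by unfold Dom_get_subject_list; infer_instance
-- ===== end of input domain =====

-- B groups by subject with a dedup-keys-then-filter-per-key comprehension instead of A's
-- one-pass dict accumulation; same result (A's dict is in first-occurrence key order too), not faster.

-- subject = image.split('_')[0]; split? with a nonempty separator never returns none, and never some [], so the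
-- index 0 always succeeds: both .getD defaults are unreachable.
def pvKey (image : String) : String := (PySem.List.pyGet? ((PySem.Str.split? image "_").getD []) 0).getD ""

-- ===== PORT A =====
def get_subject_list (image_list : List String) : List (String × List String) :=
  (image_list.foldl (fun d image =>
      let subject := pvKey image
      if d.contains subject then d.insert subject (d.getD subject [] ++ [image])
      else d.insert subject [image])
    PySem.Dict.empty).items

-- ===== PORT B =====
def get_subject_list_alt (image_list : List String) : List (String × List String) :=
  (PySem.List.dedup (image_list.map pvKey)).map
    (fun s => (s, image_list.filter (fun img => pvKey img == s)))

-- ===== PRECONDITION & SPEC =====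
def Spec_get_subject_list (image_list : List String) (out : List (String × List String)) : Prop := out = get_subject_list_alt image_list
instance (image_list : List String) (out : List (String × List String)) : Decidable (Spec_get_subject_list image_list out) := by unfold Spec_get_subject_list; infer_instance

-- ===== CLAIM (what is proved, stated in full; the proofs are below) =====
def Claim_equal_get_subject_list : Prop := ∀ (image_list : List String), Dom_get_subject_list image_list → Spec_get_subject_list image_list (get_subject_list image_list)

-- ===== LEMMAS AND PROOFS =====

-- A's two branches are exactly Dict.modify with default []
theorem pv_step_eq (d : PySem.Dict String (List String)) (image : String) :
    (let subject := pvKey image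
     if d.contains subject then d.insert subject (d.getD subject [] ++ [image])
     else d.insert subject [image]) = d.modify (pvKey image) [] (· ++ [image]) := by
  simp only [PySem.Dict.modify]
  by_cases h : d.contains (pvKey image) = true
  · simp [h]
  · simp only [Bool.not_eq_true] at h
    simp [h, PySem.Dict.getD_of_not_contains d [] h]

theorem pv_foldl_eq (image_list : List String) :
    image_list.foldl (fun d image =>
      let subject := pvKey image
      if d.contains subject then d.insert subject (d.getD subject [] ++ [image])
      else d.insert subject [image]) PySem.Dict.empty
    = image_list.foldl (fun d image => d.modify (pvKey image) [] (· ++ [image]))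
        PySem.Dict.empty := by
  apply PySem.List.foldl_congr_mem
  intro d image _
  exact pv_step_eq d image

-- ===== VERDICT (by name: the statement is the Claim_ definition above) =====
theorem get_subject_list_spec : Claim_equal_get_subject_list := by
  intro image_list _
  show _ = _
  unfold get_subject_list get_subject_list_alt
  rw [pv_foldl_eq]
  set D := image_list.foldl (fun d image => d.modify (pvKey image) [] (· ++ [image]))
      PySem.Dict.empty with hD
  have hnd : D.keys.Nodup := by
    exact PySem.Dict.nodup_keys_foldl_modify_key image_list pvKey [] (fun d x => (· ++ [x]))
      PySem.Dict.empty (by simp)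
  have hkeys : D.keys = PySem.List.dedup (image_list.map pvKey) := by
    rw [hD, PySem.Dict.keys_foldl_modify_key]
    simp [PySem.Dict.keys_empty, PySem.Set.update_nil_left]
  have hget : ∀ c, D.getD c [] = image_list.filter (fun img => pvKey img == c) := by
    intro c
    have hmap : D = (image_list.map (fun img => (pvKey img, img))).foldl
        (fun d p => d.modify p.1 [] (· ++ [p.2])) PySem.Dict.empty := by
      rw [hD, List.foldl_map]
    rw [hmap, PySem.Dict.getD_foldl_modify_append]
    simp [PySem.Dict.getD_empty, List.filter_map, Function.comp_def, List.map_map]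
  rw [PySem.Dict.items_eq_map_keys D hnd [], hkeys]
  exact List.map_congr_left (fun k _ => by rw [hget k])
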